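-- pv_equiv track=rewrite | github.com/peguo0/cowFace | plot_heatmap_cowNumber.py | covertToSameLength
-- ===== SOURCE A (Python) =====
-- def covertToSameLength(dictIn, dates):
--     numOfDays = len(dates)
--     dictOut = {}
--     for eid, appearedDays in dictIn.items():
--         dictOut[eid] = zerolistmaker(numOfDays)
--         for day in appearedDays:
--             index = dates.index(day)
--             dictOut[eid][index] = dictOut[eid][index] + 1
--     return dictOut
--
-- def zerolistmaker(n):
--     listofzeros = [0] * n
--     return listofzeros
-- ===== SOURCE B (Python) =====
-- def covertToSameLength(dictIn, dates):
--     # Aggregate first, then place: build a frequency table of each entity's appeared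
--     # days, then write each distinct day's total count into the zero vector at
--     # dates.index(day) -- one index lookup per distinct day instead of per appearance.
--     dictOut = {}
--     for eid, appearedDays in dictIn.items():
--         freq = {}
--         for day in appearedDays:
--             freq[day] = freq.get(day, 0) + 1
--         vec = [0] * len(dates)
--         for day, cnt in freq.items():
--             vec[dates.index(day)] += cnt
--         dictOut[eid] = vec
--     return dictOut
-- ===== Notes on version B (the rewrite author's own statement) =====
-- stated objective: alternative
-- what changed: A increments dictOut[eid][dates.index(day)] once per appearance; B first aggregates each entity's appeared days into a frequency table and then places each distinct day's total count into the zero vector with one dates.index lookup per distinct day.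
import Mathlib
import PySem

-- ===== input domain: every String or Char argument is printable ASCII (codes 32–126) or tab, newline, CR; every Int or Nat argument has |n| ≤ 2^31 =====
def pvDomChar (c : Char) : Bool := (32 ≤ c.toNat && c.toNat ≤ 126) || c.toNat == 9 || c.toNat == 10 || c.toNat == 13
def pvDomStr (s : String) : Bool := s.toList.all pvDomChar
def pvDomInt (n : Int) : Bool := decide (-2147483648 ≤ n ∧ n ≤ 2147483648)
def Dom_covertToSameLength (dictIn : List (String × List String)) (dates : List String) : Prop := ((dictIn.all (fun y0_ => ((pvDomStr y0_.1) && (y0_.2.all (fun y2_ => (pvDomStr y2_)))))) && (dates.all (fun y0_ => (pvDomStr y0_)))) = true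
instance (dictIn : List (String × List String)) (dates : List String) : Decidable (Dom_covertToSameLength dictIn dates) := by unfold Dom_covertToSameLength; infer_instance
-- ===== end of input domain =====

-- B aggregates each entity's appeared days into a frequency table first and then places each
-- distinct day's total count at dates.index(day) in the zero vector (objective: alternative).


-- ===== PORT A =====
def zerolistmaker (n : Nat) : List Int := List.replicate n 0

-- one step of A's inner loop: index = dates.index(day); vec[index] = vec[index] + 1
-- (dates.index raising ValueError = index? none; those inputs are outside Pre_)
def aStep (dates : List String) (v : List Int) (day : String) : List Int :=
  match PySem.List.index? dates day with
  | some index => v.set index (v.getD index 0 + 1)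
  | none => v

def covertToSameLength (dictIn : List (String × List String)) (dates : List String) : List (String × List Int) :=
  let numOfDays := dates.length
  (dictIn.foldl (fun (dictOut : PySem.Dict String (List Int)) p =>
      dictOut.insert p.1 (p.2.foldl (aStep dates) (zerolistmaker numOfDays)))
    PySem.Dict.empty).items

-- ===== PORT B =====
-- freq = {}; for day in appearedDays: freq[day] = freq.get(day, 0) + 1
def bFreq (appearedDays : List String) : PySem.Dict String Int :=
  appearedDays.foldl (fun d day => d.insert day (d.getD day 0 + 1)) PySem.Dict.empty

-- one step of B's placing loop: vec[dates.index(day)] += cnt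
-- (dates.index raising ValueError = index? none; those inputs are outside Pre_)
def bPlace (dates : List String) (v : List Int) (q : String × Int) : List Int :=
  match PySem.List.index? dates q.1 with
  | some i => v.set i (v.getD i 0 + q.2)
  | none => v

def bVec (dates : List String) (appearedDays : List String) : List Int :=
  (bFreq appearedDays).items.foldl (bPlace dates) (List.replicate dates.length 0)

def covertToSameLength_alt (dictIn : List (String × List String)) (dates : List String) : List (String × List Int) :=
  (dictIn.foldl (fun (d : PySem.Dict String (List Int)) p => d.insert p.1 (bVec dates p.2))
    PySem.Dict.empty).items

-- ===== PRECONDITION & SPEC =====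
-- Pre_ excludes exactly the inputs on which A's dates.index raises ValueError: some appeared day absent from dates.
def Pre_covertToSameLength (dictIn : List (String × List String)) (dates : List String) : Prop :=
  ∀ p ∈ dictIn, ∀ day ∈ p.2, day ∈ dates
instance (dictIn : List (String × List String)) (dates : List String) : Decidable (Pre_covertToSameLength dictIn dates) := by unfold Pre_covertToSameLength; infer_instance

def pvWitness_covertToSameLength : (List (String × List String)) × List String :=
  ([("cow1", ["d1", "d1", "d2"]), ("cow2", ["d2"])], ["d1", "d2"])

def Spec_covertToSameLength (dictIn : List (String × List String)) (dates : List String) (out : List (String × List Int)) : Prop := out = covertToSameLength_alt dictIn dates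
instance (dictIn : List (String × List String)) (dates : List String) (out : List (String × List Int)) : Decidable (Spec_covertToSameLength dictIn dates out) := by unfold Spec_covertToSameLength; infer_instance

-- ===== CLAIM (what is proved, stated in full; the proofs are below) =====
def Claim_equal_covertToSameLength : Prop := ∀ (dictIn : List (String × List String)) (dates : List String), Dom_covertToSameLength dictIn dates → Pre_covertToSameLength dictIn dates → Spec_covertToSameLength dictIn dates (covertToSameLength dictIn dates)

-- ===== LEMMAS AND PROOFS =====
theorem getD_set' (v : List Int) (i k : Nat) (x : Int) (h : i < v.length) :
    (v.set i x).getD k 0 = if k = i then x else v.getD k 0 := by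
  rcases eq_or_ne k i with rfl | hne
  · simp [List.getD_eq_getElem?_getD, h]
  · simp [List.getD_eq_getElem?_getD, Ne.symm hne, hne]

theorem index?_lt_length {dates : List String} {d : String} {k : Nat}
    (h : PySem.List.index? dates d = some k) : k < dates.length := by
  obtain ⟨hk, _, _⟩ := PySem.List.getElem_of_index?_eq_some h
  exact hk

theorem length_foldl_aStep (dates : List String) (days : List String) (v : List Int) :
    (days.foldl (aStep dates) v).length = v.length := by
  induction days generalizing v with
  | nil => rfl
  | cons d ds ih =>
    rw [List.foldl_cons, ih]
    rcases h : PySem.List.index? dates d with _ | idx <;>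
      simp only [aStep, h, List.length_set]

theorem foldl_aStep_getD (dates : List String) (days : List String) (v : List Int)
    (hv : v.length = dates.length) (k : Nat) :
    (days.foldl (aStep dates) v).getD k 0 =
      v.getD k 0 + (days.countP (fun d => PySem.List.index? dates d == some k) : Int) := by
  induction days generalizing v with
  | nil => simp
  | cons d ds ih =>
    rw [List.foldl_cons, List.countP_cons]
    rcases h : PySem.List.index? dates d with _ | idx
    · rw [show aStep dates v d = v by simp only [aStep, h], ih v hv]
      norm_num
    · have hidx : idx < v.length := hv ▸ index?_lt_length h
      rw [show aStep dates v d = v.set idx (v.getD idx 0 + 1) by simp only [aStep, h],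
        ih _ (by simp [hv]), getD_set' v idx k _ hidx]
      rcases eq_or_ne k idx with rfl | hne
      · simp
        ring
      · have hik : ¬ idx = k := fun e => hne e.symm
        simp [hne, hik]

theorem length_foldl_bPlace (dates : List String) (L : List (String × Int)) (v : List Int) :
    (L.foldl (bPlace dates) v).length = v.length := by
  induction L generalizing v with
  | nil => rfl
  | cons q qs ih =>
    rw [List.foldl_cons, ih]
    rcases h : PySem.List.index? dates q.1 with _ | idx <;>
      simp only [bPlace, h, List.length_set]

theorem foldl_bPlace_getD (dates : List String) (L : List (String × Int)) (v : List Int)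
    (hv : v.length = dates.length) (k : Nat) :
    (L.foldl (bPlace dates) v).getD k 0 =
      v.getD k 0 + ((L.filter (fun q => PySem.List.index? dates q.1 == some k)).map
        (fun q => q.2)).sum := by
  induction L generalizing v with
  | nil => simp
  | cons q qs ih =>
    rw [List.foldl_cons, List.filter_cons]
    rcases h : PySem.List.index? dates q.1 with _ | idx
    · rw [show bPlace dates v q = v by simp only [bPlace, h], ih v hv]
      norm_num
    · have hidx : idx < v.length := hv ▸ index?_lt_length h
      rw [show bPlace dates v q = v.set idx (v.getD idx 0 + q.2) by simp only [bPlace, h],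
        ih _ (by simp [hv]), getD_set' v idx k _ hidx]
      rcases eq_or_ne k idx with rfl | hne
      · simp
        ring
      · have hik : ¬ idx = k := fun e => hne e.symm
        simp [hne, hik]

theorem items_bFreq (days : List String) : (bFreq days).items
    = (PySem.Set.ofList days).map (fun x => (x, (days.count x : Int))) := by
  rw [bFreq, PySem.Dict.foldl_insert_getD_add_one_eq_counter, PySem.Dict.items_counter]

theorem countP_eq_count (dates days : List String) (k : Nat) (hk : k < dates.length)
    (h : PySem.List.index? dates dates[k] = some k) :
    days.countP (fun d => PySem.List.index? dates d == some k) = days.count dates[k] := by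
  rw [List.count]
  apply List.countP_congr
  intro d _
  constructor
  · intro hd
    obtain ⟨_, hd2, _⟩ := PySem.List.getElem_of_index?_eq_some (eq_of_beq hd)
    simp [hd2]
  · intro hd
    have hdd : d = dates[k] := by simpa using eq_of_beq hd
    subst hdd
    rw [h]; simp

theorem countP_eq_zero' (dates days : List String) (k j : Nat) (hk : k < dates.length)
    (h : PySem.List.index? dates dates[k] = some j) (hne : j ≠ k) :
    days.countP (fun d => PySem.List.index? dates d == some k) = 0 := by
  apply List.countP_eq_zero.2
  intro d _ hd
  have hd' : PySem.List.index? dates d = some k := eq_of_beq hd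
  obtain ⟨_, hd2, _⟩ := PySem.List.getElem_of_index?_eq_some hd'
  rw [hd2] at h
  exact hne (Option.some.inj (h.symm.trans hd'))

theorem index?_getElem_ne_none (dates : List String) (k : Nat) (hk : k < dates.length) :
    PySem.List.index? dates dates[k] ≠ none := by
  intro h
  have := (PySem.List.index?_isSome_iff dates dates[k]).2 (dates.getElem_mem hk)
  rw [h] at this
  simp at this

theorem sum_items_filter (dates days : List String) (k : Nat) (hk : k < dates.length) :
    ((((PySem.Set.ofList days).map (fun x => (x, (days.count x : Int)))).filter
        (fun q => PySem.List.index? dates q.1 == some k)).map (fun q => q.2)).sum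
      = (days.countP (fun d => PySem.List.index? dates d == some k) : Int) := by
  rw [List.filter_map, List.map_map]
  rcases h : PySem.List.index? dates dates[k] with _ | j
  · exact absurd h (index?_getElem_ne_none dates k hk)
  · rcases eq_or_ne j k with rfl | hne
    · have hpred : ∀ x : String,
          ((fun q : String × Int => PySem.List.index? dates q.1 == some j) ∘
            (fun x => (x, (days.count x : Int)))) x = (x == dates[j]) := by
        intro x
        by_cases hx : x = dates[j]
        · subst hx
          simp only [Function.comp_apply]
          rw [h]
          simp
        · have h1 : PySem.List.index? dates x ≠ some j := by
            intro e
            obtain ⟨_, e2, _⟩ := PySem.List.getElem_of_index?_eq_some e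
            exact hx e2.symm
          simp only [Function.comp_apply]
          rw [beq_eq_false_iff_ne.2 h1, beq_eq_false_iff_ne.2 hx]
      rw [List.filter_congr (fun x _ => hpred x), List.filter_beq dates[j],
        countP_eq_count dates days j hk h]
      by_cases hmem : dates[j] ∈ days
      · rw [List.count_eq_one_of_mem (PySem.Set.nodup_ofList days)
          ((PySem.Set.mem_ofList days _).2 hmem)]
        simp
      · rw [List.count_eq_zero.2 (fun hc => hmem ((PySem.Set.mem_ofList days _).1 hc)),
          List.count_eq_zero.2 hmem]
        simp
    · have hpred : ∀ x : String,
          ¬ (((fun q : String × Int => PySem.List.index? dates q.1 == some k) ∘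
            (fun x => (x, (days.count x : Int)))) x = true) := by
        intro x e
        have e' : PySem.List.index? dates x = some k := eq_of_beq (by simpa using e)
        obtain ⟨_, e2, _⟩ := PySem.List.getElem_of_index?_eq_some e'
        rw [e2] at h
        exact hne (Option.some.inj (h.symm.trans e'))
      rw [List.filter_eq_nil_iff.2 (fun x _ => hpred x),
        countP_eq_zero' dates days k j hk h hne]
      simp

-- the per-entity vectors of the two ports agree
theorem vec_eq (dates : List String) (days : List String) :
    days.foldl (aStep dates) (zerolistmaker dates.length) = bVec dates days := by
  have hlenA : (days.foldl (aStep dates) (zerolistmaker dates.length)).length = dates.length := by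
    simp [length_foldl_aStep, zerolistmaker]
  have hlenB : (bVec dates days).length = dates.length := by
    simp [bVec, length_foldl_bPlace]
  apply List.ext_getElem (by omega)
  intro k hkA hkB
  have hk : k < dates.length := by omega
  rw [show (days.foldl (aStep dates) (zerolistmaker dates.length))[k] =
      (days.foldl (aStep dates) (zerolistmaker dates.length)).getD k 0 from
      (List.getD_eq_getElem _ _ hkA).symm,
    show (bVec dates days)[k] = (bVec dates days).getD k 0 from
      (List.getD_eq_getElem _ _ hkB).symm]
  have hz : (List.replicate dates.length (0 : Int)).getD k 0 = 0 := by
    simp [List.getD_eq_getElem?_getD, hk]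
  rw [foldl_aStep_getD dates days _ (by simp [zerolistmaker]) k,
    show (zerolistmaker dates.length).getD k 0 = 0 from hz]
  rw [bVec, items_bFreq,
    foldl_bPlace_getD dates _ _ (by simp) k, hz, sum_items_filter dates days k hk]

-- ===== VERDICT (by name: the statement is the Claim_ definition above) =====
theorem covertToSameLength_spec : Claim_equal_covertToSameLength := by
  unfold Claim_equal_covertToSameLength
  intro dictIn dates _ _
  unfold Spec_covertToSameLength covertToSameLength covertToSameLength_alt
  dsimp only
  congr 1
  apply PySem.List.foldl_congr_mem
  intro acc p _
  rw [vec_eq]
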